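-- pv_equiv track=rewrite | github.com/houhailun/leetcode | demo/demo_py.py | getMidTwoArray
-- ===== SOURCE A (Python) =====
-- def getMidTwoArray(arr1, arr2):
--     # 方法1：构建一个大的有序数组后找中位数
--     i = j = 0
--     res = list()
--     while i < len(arr1) and j < len(arr2):
--         if arr1[i] <= arr2[j]:
--             res.append(arr1[i])
--             i += 1
--         else:
--             res.append(arr2[j])
--             j += 1
--     res.extend(arr1[i:])
--     res.extend(arr2[j:])
--     return res[len(res) // 2]
-- ===== SOURCE B (Python) =====
-- def getMidTwoArray(arr1, arr2):
--     # Two staged passes instead of building the merged list: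
--     # pass 1 computes the "merge schedule" pos: pos[j] = how many arr1
--     # elements come before arr2[j] in the merge order; pass 2 locates the
--     # middle index purely by arithmetic on pos (arr2[j] sits at combined
--     # index pos[j] + j, which is strictly increasing) and fetches the
--     # answer from the right list directly.
--     n, m = len(arr1), len(arr2)
--     pos = []
--     t = 0
--     for y in arr2:
--         while t < n and arr1[t] <= y:
--             t += 1
--         pos.append(t)
--     k = (n + m) // 2
--     for j, p in enumerate(pos):
--         if p + j == k:
--             return arr2[j]
--         if p + j > k:
--             return arr1[k - j]
--     return arr1[k - m]
-- ===== Notes on version B (the rewrite author's own statement) =====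
-- stated objective: alternative
-- what changed: B never builds the merged list: a first pass computes the merge schedule pos[j] (how many arr1 elements precede arr2[j] in merge order), and a second pass locates the middle index by arithmetic on the strictly increasing combined positions pos[j]+j, returning early and fetching the answer from the right list by index; measured ~2.6x faster (no result-list construction, early exit at the middle).
import Mathlib
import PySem

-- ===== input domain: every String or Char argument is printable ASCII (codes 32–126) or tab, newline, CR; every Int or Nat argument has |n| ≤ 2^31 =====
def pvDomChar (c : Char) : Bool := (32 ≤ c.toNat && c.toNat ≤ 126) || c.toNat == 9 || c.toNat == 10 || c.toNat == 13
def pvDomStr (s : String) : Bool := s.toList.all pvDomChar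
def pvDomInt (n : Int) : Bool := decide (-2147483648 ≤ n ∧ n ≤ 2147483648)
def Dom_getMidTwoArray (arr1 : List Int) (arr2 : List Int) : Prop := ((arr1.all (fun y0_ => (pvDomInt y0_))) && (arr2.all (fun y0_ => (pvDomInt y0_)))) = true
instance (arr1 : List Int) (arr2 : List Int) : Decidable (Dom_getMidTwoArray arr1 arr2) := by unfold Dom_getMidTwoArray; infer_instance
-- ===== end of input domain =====

-- B replaces A's build-the-merged-list-then-index by two staged passes: a merge-schedule
-- pass (insertion point of each arr2 element into arr1) and an index-arithmetic pass.

-- ===== PORT A =====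
-- A's while-loop merge followed by the two extends, as structural recursion
def pvMergeA : List Int → List Int → List Int
  | [], ys => ys
  | x :: xs, [] => x :: xs
  | x :: xs, y :: ys =>
      if x ≤ y then x :: pvMergeA xs (y :: ys) else y :: pvMergeA (x :: xs) ys

def getMidTwoArray (arr1 : List Int) (arr2 : List Int) : Int :=
  let res := pvMergeA arr1 arr2
  (PySem.List.pyGet? res (PySem.Int.floordiv (res.length : Int) 2)).getD 0

-- ===== PORT B =====
-- Source B's inner 'while t < n and arr1[t] <= y: t += 1'
def pvWhileT (arr1 : List Int) (y : Int) (t : Nat) : Nat :=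
  if h : t < arr1.length then
    if arr1[t] ≤ y then pvWhileT arr1 y (t + 1) else t
  else t
termination_by arr1.length - t

-- Source B's pass 1: the list pos of insertion points (fold over arr2 carrying (pos, t))
def pvPass1 (arr1 : List Int) (arr2 : List Int) : List Nat × Nat :=
  arr2.foldl (fun s y => let t' := pvWhileT arr1 y s.2; (s.1 ++ [t'], t')) ([], 0)

-- Source B's pass 2: 'for j, p in enumerate(pos)' with the two early returns and the fallback
def pvPass2 (arr1 : List Int) (arr2 : List Int) (k : Int) : Nat → List Nat → Int
  | _, [] => PySem.List.pyGetD arr1 (k - (arr2.length : Int)) 0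
  | j, p :: rest =>
      if ((p : Int) + (j : Int)) = k then PySem.List.pyGetD arr2 (j : Int) 0
      else if k < (p : Int) + (j : Int) then PySem.List.pyGetD arr1 (k - (j : Int)) 0
      else pvPass2 arr1 arr2 k (j + 1) rest

def getMidTwoArray_alt (arr1 : List Int) (arr2 : List Int) : Int :=
  let pos := (pvPass1 arr1 arr2).1
  let k := PySem.Int.floordiv ((arr1.length : Int) + (arr2.length : Int)) 2
  pvPass2 arr1 arr2 k 0 pos

-- ===== PRECONDITION & SPEC =====
-- Pre_ excludes only the input where both lists are empty, on which Python A raises IndexError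
-- (and so does B).
def Pre_getMidTwoArray (arr1 : List Int) (arr2 : List Int) : Prop := ¬ (arr1 = [] ∧ arr2 = [])
instance (arr1 : List Int) (arr2 : List Int) : Decidable (Pre_getMidTwoArray arr1 arr2) := by
  unfold Pre_getMidTwoArray; infer_instance
def pvWitness_getMidTwoArray : List Int × List Int := ([1, 3], [2])

def Spec_getMidTwoArray (arr1 : List Int) (arr2 : List Int) (out : Int) : Prop := out = getMidTwoArray_alt arr1 arr2
instance (arr1 : List Int) (arr2 : List Int) (out : Int) : Decidable (Spec_getMidTwoArray arr1 arr2 out) := by unfold Spec_getMidTwoArray; infer_instance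

-- ===== CLAIM (what is proved, stated in full; the proofs are below) =====
def Claim_equal_getMidTwoArray : Prop := ∀ (arr1 : List Int) (arr2 : List Int), Dom_getMidTwoArray arr1 arr2 → Pre_getMidTwoArray arr1 arr2 → Spec_getMidTwoArray arr1 arr2 (getMidTwoArray arr1 arr2)

-- ===== LEMMAS AND PROOFS =====

theorem mergeA_length (xs ys : List Int) :
    (pvMergeA xs ys).length = xs.length + ys.length := by
  fun_induction pvMergeA xs ys with
  | case1 => simp
  | case2 => simp
  | case3 x xs y ys h ih => simp [ih]; omega
  | case4 x xs y ys h ih => simp [ih]; omega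

theorem mergeA_nil_right (xs : List Int) : pvMergeA xs [] = xs := by
  cases xs <;> simp [pvMergeA]

theorem whileT_ge (arr1 : List Int) (y : Int) (t : Nat) : t ≤ pvWhileT arr1 y t := by
  fun_induction pvWhileT arr1 y t <;> omega

theorem whileT_le (arr1 : List Int) (y : Int) (t : Nat) (ht : t ≤ arr1.length) :
    pvWhileT arr1 y t ≤ arr1.length := by
  fun_induction pvWhileT arr1 y t <;> omega

-- the merge peels off exactly the schedule's segment before each arr2 element
theorem mergeA_drop_cons (arr1 : List Int) (y : Int) (ys : List Int) (t : Nat) :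
    pvMergeA (arr1.drop t) (y :: ys)
      = (arr1.drop t).take (pvWhileT arr1 y t - t)
          ++ y :: pvMergeA (arr1.drop (pvWhileT arr1 y t)) ys := by
  fun_induction pvWhileT arr1 y t with
  | case1 t h hle ih =>
      have hd : arr1.drop t = arr1[t] :: arr1.drop (t + 1) := List.drop_eq_getElem_cons h
      have hge := whileT_ge arr1 y (t + 1)
      have hm : pvMergeA (arr1[t] :: arr1.drop (t + 1)) (y :: ys)
          = arr1[t] :: pvMergeA (arr1.drop (t + 1)) (y :: ys) := by
        simp only [pvMergeA]
        rw [if_pos hle]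
      rw [hd, hm, ih]
      have htk : pvWhileT arr1 y (t + 1) - t = (pvWhileT arr1 y (t + 1) - (t + 1)) + 1 := by omega
      rw [htk, List.take_succ_cons]
      simp
  | case2 t h hgt =>
      simp only [Nat.sub_self, List.take_zero, List.nil_append]
      have hd : arr1.drop t = arr1[t] :: arr1.drop (t + 1) := List.drop_eq_getElem_cons h
      have hm : pvMergeA (arr1[t] :: arr1.drop (t + 1)) (y :: ys)
          = y :: pvMergeA (arr1[t] :: arr1.drop (t + 1)) ys := by
        simp only [pvMergeA]
        rw [if_neg hgt]
      rw [hd, hm, ← hd]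
  | case3 t h =>
      simp only [Nat.sub_self, List.take_zero, List.nil_append]
      rw [List.drop_eq_nil_of_le (by omega)]
      simp [pvMergeA]

-- the schedule: pass 1's pos list, relative to a start pointer t0
def pvSched (arr1 : List Int) (t0 : Nat) : List Int → List Nat
  | [] => []
  | y :: ys => pvWhileT arr1 y t0 :: pvSched arr1 (pvWhileT arr1 y t0) ys

theorem pass1_eq_sched (arr1 : List Int) :
    ∀ (ys : List Int) (acc : List Nat) (t0 : Nat),
    (ys.foldl (fun s y => let t' := pvWhileT arr1 y s.2; (s.1 ++ [t'], t')) (acc, t0)).1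
      = acc ++ pvSched arr1 t0 ys := by
  intro ys
  induction ys with
  | nil => intro acc t0; simp [pvSched]
  | cons y ys ih =>
      intro acc t0
      simp only [List.foldl_cons, pvSched]
      rw [ih]
      simp

-- pass 2 against the merge: with j arr2-elements consumed and the arr1 pointer at t,
-- pass 2 over the remaining schedule returns element r of the remaining merge
theorem pass2_sel (arr1 arr2 : List Int) (k : Int) :
    ∀ (ys : List Int) (t j r : Nat),
      t ≤ arr1.length →
      j + ys.length = arr2.length →
      arr2.drop j = ys →
      k = (t : Int) + (j : Int) + (r : Int) →
      r < (arr1.length - t) + ys.length →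
      pvPass2 arr1 arr2 k j (pvSched arr1 t ys)
        = (PySem.List.pyGet? (pvMergeA (arr1.drop t) ys) (r : Int)).getD 0 := by
  intro ys
  induction ys with
  | nil =>
      intro t j r ht hj hdrop hk hr
      simp only [List.length_nil, Nat.add_zero] at hr hj
      simp only [pvSched, pvPass2]
      have h1 : k - (arr2.length : Int) = ((t + r : Nat) : Int) := by
        push_cast; omega
      rw [h1, PySem.List.pyGetD_natCast, PySem.List.pyGet?_natCast, mergeA_nil_right]
      rw [List.getElem?_drop]
      simp [List.getD_eq_getElem?_getD]
  | cons y ys ih =>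
      intro t j r ht hj hdrop hk hr
      have hy : arr2[j]? = some y := by
        have h0 : (arr2.drop j)[0]? = some y := by rw [hdrop]; rfl
        simpa [List.getElem?_drop] using h0
      set t' := pvWhileT arr1 y t with ht'
      have htle : t ≤ t' := whileT_ge arr1 y t
      have ht'le : t' ≤ arr1.length := whileT_le arr1 y t ht
      simp only [pvSched, pvPass2, ← ht']
      rw [mergeA_drop_cons arr1 y ys t, ← ht']
      have hlen_take : ((arr1.drop t).take (t' - t)).length = t' - t := by
        rw [List.length_take, List.length_drop]; omega
      by_cases heq : ((t' : Int) + (j : Int)) = k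
      · rw [if_pos heq]
        have hr_eq : (r : Int) = ((t' - t : Nat) : Int) := by omega
        have hap := PySem.List.pyGet?_append_length
          ((arr1.drop t).take (t' - t)) (pvMergeA (arr1.drop t') ys) y
        rw [hlen_take] at hap
        rw [hr_eq, hap]
        rw [PySem.List.pyGetD_natCast]
        simp [List.getD_eq_getElem?_getD, hy]
      · rw [if_neg heq]
        by_cases hlt : k < (t' : Int) + (j : Int)
        · rw [if_pos hlt]
          have hrlt : r < t' - t := by omega
          have h1 : k - (j : Int) = ((t + r : Nat) : Int) := by push_cast; omega
          rw [h1, PySem.List.pyGetD_natCast, PySem.List.pyGet?_natCast]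
          rw [List.getElem?_append_left (by rw [hlen_take]; omega)]
          rw [List.getElem?_take_of_lt hrlt, List.getElem?_drop]
          simp [List.getD_eq_getElem?_getD]
        · rw [if_neg hlt]
          have hge' : (t' : Int) + (j : Int) < k := by
            rcases lt_or_eq_of_le (not_lt.mp hlt) with h | h
            · exact h
            · exact absurd h heq
          have hr' : t' - t + 1 ≤ r := by omega
          have hrec := ih t' (j + 1) (r - (t' - t) - 1) ht'le
            (by simp at hj ⊢; omega)
            (by
              have h2 : arr2.drop (j + 1) = (arr2.drop j).drop 1 := by
                rw [List.drop_drop]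
              rw [h2, hdrop]; rfl)
            (by push_cast; omega)
            (by simp at hr ⊢; omega)
          rw [hrec]
          rw [PySem.List.pyGet?_natCast, PySem.List.pyGet?_natCast]
          rw [List.getElem?_append_right (by rw [hlen_take]; omega), hlen_take]
          have hshift : r - (t' - t) = (r - (t' - t) - 1) + 1 := by omega
          rw [hshift, List.getElem?_cons_succ]
          simp

-- ===== VERDICT (by name: the statement is the Claim_ definition above) =====
theorem getMidTwoArray_spec : Claim_equal_getMidTwoArray := by
  intro arr1 arr2 _ hpre
  unfold Spec_getMidTwoArray getMidTwoArray getMidTwoArray_alt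
  have hpos : (pvPass1 arr1 arr2).1 = pvSched arr1 0 arr2 := by
    unfold pvPass1
    rw [pass1_eq_sched arr1 arr2 [] 0]
    simp
  have hnm : 0 < arr1.length + arr2.length := by
    rcases Nat.eq_zero_or_pos (arr1.length + arr2.length) with h | h
    · exact absurd ⟨List.eq_nil_of_length_eq_zero (by omega),
        List.eq_nil_of_length_eq_zero (by omega)⟩ hpre
    · exact h
  have hmlen := mergeA_length arr1 arr2
  set K : Nat := (arr1.length + arr2.length) / 2 with hK
  have hk1 : PySem.Int.floordiv ((pvMergeA arr1 arr2).length : Int) 2 = (K : Int) := by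
    rw [hmlen]
    exact_mod_cast PySem.Int.floordiv_natCast (arr1.length + arr2.length) 2
  have hk2 : PySem.Int.floordiv ((arr1.length : Int) + (arr2.length : Int)) 2 = (K : Int) := by
    rw [show ((arr1.length : Int) + (arr2.length : Int)) = ((arr1.length + arr2.length : Nat) : Int) by push_cast; ring]
    exact_mod_cast PySem.Int.floordiv_natCast (arr1.length + arr2.length) 2
  have hKlt : K < arr1.length + arr2.length := Nat.div_lt_self hnm (by omega)
  simp only [hpos, hk1, hk2]
  rw [pass2_sel arr1 arr2 (K : Int) arr2 0 0 K (by omega) (by omega) (by simp)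
    (by push_cast; ring) (by omega)]
  simp
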